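-- pv_equiv track=rewrite | github.com/miliar/Code_Jam_Webscraper | solutions_python/solutions_year15_round0_nr1/1344.py | opera
-- ===== SOURCE A (Python) =====
-- def opera(shyness):
--     required_friends = 0
--     currently_clapping = 0
--     for level_shyness, level_population in enumerate(shyness):
--         if currently_clapping < level_shyness:
--             level_missing = level_shyness - currently_clapping
--             required_friends += level_missing
--             currently_clapping += level_missing
--         currently_clapping += level_population
--     return required_friends
-- ===== SOURCE B (Python) =====
-- def opera(shyness):
--     # Binary search for the least number of pre-seeded clapping friends k such
--     # that the audience chain never stalls; the feasibility check is monotone in k.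
--     def enough(k):
--         clapping = k
--         for level, population in enumerate(shyness):
--             if clapping < level:
--                 return False
--             clapping += population
--         return True
--
--     lo = 0
--     hi = len(shyness) + sum(abs(x) for x in shyness)
--     while lo < hi:
--         mid = (lo + hi) // 2
--         if enough(mid):
--             hi = mid
--         else:
--             lo = mid + 1
--     return lo
-- ===== Notes on version B (the rewrite author's own statement) =====
-- stated objective: alternative
-- what changed: B replaces A's one-pass greedy simulation (conditionally topping up a clapping counter) by a binary search for the least number of pre-seeded friends whose monotone feasibility check (simulate with k initial clappers and see whether the chain ever stalls) succeeds.
import Mathlib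
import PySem

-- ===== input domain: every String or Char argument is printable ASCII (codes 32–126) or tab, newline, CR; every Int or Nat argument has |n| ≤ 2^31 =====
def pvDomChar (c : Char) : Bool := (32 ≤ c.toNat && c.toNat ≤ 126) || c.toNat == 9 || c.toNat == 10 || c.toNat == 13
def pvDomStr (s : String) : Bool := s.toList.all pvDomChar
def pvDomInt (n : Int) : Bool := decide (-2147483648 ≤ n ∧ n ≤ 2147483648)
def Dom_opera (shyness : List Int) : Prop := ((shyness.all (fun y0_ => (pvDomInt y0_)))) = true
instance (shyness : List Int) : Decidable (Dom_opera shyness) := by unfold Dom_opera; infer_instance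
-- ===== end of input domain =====

-- B replaces A's greedy top-up simulation by a binary search over the number of
-- pre-seeded friends with a monotone stall-check; alternative algorithm, not faster.

-- ===== PORT A =====
-- loop over enumerate(shyness) with state (required_friends, currently_clapping)
def operaGo : List (Int × Int) → Int → Int → Int
  | [], f, _ => f
  | (i, p) :: rest, f, c =>
      if c < i then operaGo rest (f + (i - c)) ((c + (i - c)) + p)
      else operaGo rest f (c + p)

def opera (shyness : List Int) : Int :=
  operaGo (PySem.List.enumerate shyness) 0 0

-- ===== PORT B =====
-- 'enough(k)': simulate with k initial clappers; False as soon as the chain stalls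
def enoughGo : List (Int × Int) → Int → Bool
  | [], _ => true
  | (i, p) :: rest, c =>
      if c < i then false else enoughGo rest (c + p)

-- the while-loop 'lo < hi: mid = (lo+hi)//2; if enough(mid): hi = mid else lo = mid+1'
def bsearchGo (ok : Int → Bool) (lo hi : Int) : Int :=
  if h : lo < hi then
    let mid := PySem.Int.floordiv (lo + hi) 2
    if ok mid then bsearchGo ok lo mid else bsearchGo ok (mid + 1) hi
  else lo
termination_by (hi - lo).toNat
decreasing_by
  · have := (PySem.Int.floordiv_two_mid_bounds (le_of_lt h)).1
    have h2 : PySem.Int.floordiv (lo + hi) 2 < hi := by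
      rw [PySem.Int.floordiv_lt_iff_lt_mul (by omega : (0:Int) < 2)]; omega
    omega
  · have := (PySem.Int.floordiv_two_mid_bounds (le_of_lt h)).2
    have h1 : lo ≤ PySem.Int.floordiv (lo + hi) 2 := by
      rw [PySem.Int.le_floordiv_iff_mul_le (by omega : (0:Int) < 2)]; omega
    omega

def opera_alt (shyness : List Int) : Int :=
  bsearchGo (fun k => enoughGo (PySem.List.enumerate shyness) k) 0
    ((shyness.length : Int) + shyness.foldl (fun a x => a + |x|) 0)

-- ===== PRECONDITION & SPEC =====
def Spec_opera (shyness : List Int) (out : Int) : Prop := out = opera_alt shyness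
instance (shyness : List Int) (out : Int) : Decidable (Spec_opera shyness out) := by unfold Spec_opera; infer_instance

-- ===== CLAIM (what is proved, stated in full; the proofs are below) =====
def Claim_equal_opera : Prop := ∀ (shyness : List Int), Dom_opera shyness → Spec_opera shyness (opera shyness)

-- ===== LEMMAS AND PROOFS =====

-- A's friend accumulator is additive
theorem operaGo_add (l : List (Int × Int)) :
    ∀ f c : Int, operaGo l f c = f + operaGo l 0 c := by
  induction l with
  | nil => intro f c; simp [operaGo]
  | cons hd rest ih =>
      intro f c; obtain ⟨i, p⟩ := hd
      simp only [operaGo]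
      split_ifs with h
      · rw [ih (f + (i - c)), ih (0 + (i - c))]; ring
      · exact ih f (c + p)

theorem operaGo_nonneg (l : List (Int × Int)) : ∀ c : Int, 0 ≤ operaGo l 0 c := by
  induction l with
  | nil => intro c; simp [operaGo]
  | cons hd rest ih =>
      intro c; obtain ⟨i, p⟩ := hd
      simp only [operaGo]
      split_ifs with h
      · rw [operaGo_add]; have := ih ((c + (i - c)) + p); omega
      · exact ih (c + p)

-- feasibility with k extra initial clappers ↔ A needs at most k friends
theorem enough_iff (l : List (Int × Int)) :
    ∀ c k : Int, 0 ≤ k → (enoughGo l (c + k) = true ↔ operaGo l 0 c ≤ k) := by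
  induction l with
  | nil => intro c k hk; simp [enoughGo, operaGo, hk]
  | cons hd rest ih =>
      intro c k hk; obtain ⟨i, p⟩ := hd
      simp only [enoughGo, operaGo]
      split_ifs with h1 h2 h2
      · -- c + k < i and c < i : stalls, and needed (i-c)+rest > k
        have hrest := operaGo_nonneg rest ((c + (i - c)) + p)
        rw [operaGo_add]
        simp only [false_iff]
        omega
      · -- c + k < i but c ≥ i : impossible since k ≥ 0
        omega
      · -- c + k ≥ i, c < i : top up; recurse with k' = k - (i - c)
        rw [operaGo_add]
        have h4 : c + k + p = ((c + (i - c)) + p) + (k - (i - c)) := by ring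
        rw [h4, ih _ _ (by omega : (0:Int) ≤ k - (i - c))]
        omega
      · -- no stall, no top-up
        have h4 : c + k + p = (c + p) + k := by ring
        rw [h4]
        exact ih (c + p) k hk

-- shifting the accumulator of the |·|-sum fold
theorem foldlAbs_shift (l : List Int) :
    ∀ b : Int, l.foldl (fun a x => a + |x|) b = b + l.foldl (fun a x => a + |x|) 0 := by
  induction l with
  | nil => intro b; simp
  | cons y t ih =>
      intro b; simp only [List.foldl]
      rw [ih (b + |y|), ih (0 + |y|)]; ring

-- upper bound on A's answer: at most max 0 (j - c) + (|xs| + Σ|x|)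
theorem operaGo_ub (xs : List Int) :
    ∀ (j c : Int), operaGo (PySem.List.enumerate xs j) 0 c ≤
      max 0 (j - c) + ((xs.length : Int) + xs.foldl (fun a x => a + |x|) 0) := by
  induction xs with
  | nil =>
      intro j c
      simp [PySem.List.enumerate_nil, operaGo]
  | cons p rest ih =>
      intro j c
      rw [PySem.List.enumerate_cons]
      simp only [operaGo, List.length_cons, List.foldl]
      rw [foldlAbs_shift]
      have hrec1 := ih (j + 1) (j + p)
      have hrec2 := ih (j + 1) (c + p)
      have habs := abs_nonneg p
      split_ifs with h
      · rw [operaGo_add]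
        have hx : (c + (j - c)) + p = j + p := by ring
        rw [hx]
        push_cast
        rcases abs_cases p with ⟨he, hp⟩ | ⟨he, hp⟩ <;> rw [he] <;> omega
      · push_cast
        rcases abs_cases p with ⟨he, hp⟩ | ⟨he, hp⟩ <;> rw [he] <;> omega

-- the binary search returns F when ok is the '≥ F' test (on nonnegative queries) and F ∈ [lo, hi]
theorem bsearchGo_finds (ok : Int → Bool) (F : Int)
    (hok : ∀ k : Int, 0 ≤ k → (ok k = true ↔ F ≤ k)) :
    ∀ (n : Nat) (lo hi : Int), (hi - lo).toNat ≤ n → 0 ≤ lo → lo ≤ F → F ≤ hi →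
      bsearchGo ok lo hi = F := by
  intro n
  induction n with
  | zero =>
      intro lo hi hn h0 h1 h2
      rw [bsearchGo, dif_neg (by omega : ¬ lo < hi)]
      omega
  | succ m ih =>
      intro lo hi hn h0 h1 h2
      rw [bsearchGo]
      by_cases h : lo < hi
      · rw [dif_pos h]
        have hmid1 : lo ≤ PySem.Int.floordiv (lo + hi) 2 := by
          rw [PySem.Int.le_floordiv_iff_mul_le (by omega : (0:Int) < 2)]; omega
        have hmid2 : PySem.Int.floordiv (lo + hi) 2 < hi := by
          rw [PySem.Int.floordiv_lt_iff_lt_mul (by omega : (0:Int) < 2)]; omega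
        simp only
        split_ifs with hok'
        · exact ih lo _ (by omega) h0 h1 ((hok _ (by omega)).mp hok')
        · have hgt : ¬ F ≤ PySem.Int.floordiv (lo + hi) 2 := fun hc => by
            rw [(hok _ (by omega)).mpr hc] at hok'; simp at hok'
          exact ih _ hi (by omega) (by omega) (by omega) h2
      · rw [dif_neg h]; omega

-- ===== VERDICT (by name: the statement is the Claim_ definition above) =====
theorem opera_spec : Claim_equal_opera := by
  intro shyness _
  unfold Spec_opera opera_alt
  have h0 : 0 ≤ opera shyness := by unfold opera; exact operaGo_nonneg _ 0
  have hub : opera shyness ≤ (shyness.length : Int) + shyness.foldl (fun a x => a + |x|) 0 := by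
    unfold opera
    have := operaGo_ub shyness 0 0
    simpa using this
  refine (bsearchGo_finds _ (opera shyness) ?_
      (((shyness.length : Int) + shyness.foldl (fun a x => a + |x|) 0) - 0).toNat
      0 _ le_rfl le_rfl h0 hub).symm
  intro k hk
  unfold opera
  have := enough_iff (PySem.List.enumerate shyness) 0 k hk
  simpa using this
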